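-- pv_equiv track=rewrite | github.com/Yulia4sh/portfolio | relations_and_families.py | ireflexive
-- ===== SOURCE A (Python) =====
-- def ireflexive(A, B, relation):
--     """
--     Check if the relation is irreflexive.
--     """
--     for i in A:
--         if (i, i) in relation:
--             return False
--     for i in B:
--         if (i, i) in relation:
--             return False
--     return True
-- ===== SOURCE B (Python) =====
-- def ireflexive(A, B, relation):
--     """
--     Check if the relation is irreflexive.
--     """
--     domain = set(A) | set(B)
--     for pair in relation:
--         x, y = pair
--         if x == y and x in domain:
--             return False
--     return True
-- ===== Notes on version B (the rewrite author's own statement) =====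
-- stated objective: alternative
-- what changed: B builds the domain as a set once and makes a single pass over the relation looking for a diagonal pair with its element in the domain, instead of A's two loops over A and B each doing a linear membership scan of the relation.
import Mathlib
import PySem

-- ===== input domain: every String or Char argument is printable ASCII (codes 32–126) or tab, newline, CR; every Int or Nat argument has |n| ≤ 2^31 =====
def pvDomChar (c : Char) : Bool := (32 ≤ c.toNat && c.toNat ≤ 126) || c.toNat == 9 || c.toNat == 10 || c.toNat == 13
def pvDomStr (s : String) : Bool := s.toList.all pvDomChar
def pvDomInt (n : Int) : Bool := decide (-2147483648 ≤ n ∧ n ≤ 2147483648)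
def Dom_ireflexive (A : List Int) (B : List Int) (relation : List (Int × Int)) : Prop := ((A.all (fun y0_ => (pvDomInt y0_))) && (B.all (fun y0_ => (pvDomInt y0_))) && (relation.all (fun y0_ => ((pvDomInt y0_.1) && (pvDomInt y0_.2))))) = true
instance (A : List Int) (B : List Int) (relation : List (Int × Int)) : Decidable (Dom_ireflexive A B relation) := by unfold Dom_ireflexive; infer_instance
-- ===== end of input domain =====

-- B builds the domain set once and scans the relation in one pass, instead of A's two domain loops each scanning the relation; equivalent by both deciding "no domain element is related to itself".


-- ===== PORT A =====
-- 'for i in L: if (i, i) in relation: return False' — some false = early return, none = loop fell through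
def ireflexiveLoop (relation : List (Int × Int)) : List Int → Option Bool
  | [] => none
  | i :: rest => if relation.contains (i, i) then some false else ireflexiveLoop relation rest

def ireflexive (A : List Int) (B : List Int) (relation : List (Int × Int)) : Bool :=
  match ireflexiveLoop relation A with
  | some b => b
  | none =>
    match ireflexiveLoop relation B with
    | some b => b
    | none => true

-- ===== PORT B =====
-- 'for pair in relation: x, y = pair; if x == y and x in domain: return False'
def ireflexiveAltLoop (domain : PySem.Set Int) : List (Int × Int) → Bool
  | [] => true
  | (x, y) :: rest => if x == y && domain.contains x then false else ireflexiveAltLoop domain rest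

def ireflexive_alt (A : List Int) (B : List Int) (relation : List (Int × Int)) : Bool :=
  let domain := PySem.Set.union (PySem.Set.ofList A) B   -- set(A) | set(B)
  ireflexiveAltLoop domain relation

-- ===== PRECONDITION & SPEC =====
def Spec_ireflexive (A : List Int) (B : List Int) (relation : List (Int × Int)) (out : Bool) : Prop := out = ireflexive_alt A B relation
instance (A : List Int) (B : List Int) (relation : List (Int × Int)) (out : Bool) : Decidable (Spec_ireflexive A B relation out) := by unfold Spec_ireflexive; infer_instance

-- ===== CLAIM (what is proved, stated in full; the proofs are below) =====
def Claim_equal_ireflexive : Prop := ∀ (A : List Int) (B : List Int) (relation : List (Int × Int)), Dom_ireflexive A B relation → Spec_ireflexive A B relation (ireflexive A B relation)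

-- ===== LEMMAS AND PROOFS =====

theorem ireflexiveLoop_eq_none_iff (relation : List (Int × Int)) (L : List Int) :
    ireflexiveLoop relation L = none ↔ ∀ i ∈ L, (i, i) ∉ relation := by
  induction L with
  | nil => simp [ireflexiveLoop]
  | cons i rest ih =>
    simp only [ireflexiveLoop]
    by_cases h : relation.contains (i, i) <;> simp_all

theorem ireflexiveLoop_ne_none (relation : List (Int × Int)) (L : List Int)
    (h : ireflexiveLoop relation L ≠ none) : ireflexiveLoop relation L = some false := by
  induction L with
  | nil => simp [ireflexiveLoop] at h
  | cons i rest ih =>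
    simp only [ireflexiveLoop] at h ⊢
    by_cases hc : relation.contains (i, i) <;> simp_all

theorem ireflexive_eq_true_iff (A B : List Int) (relation : List (Int × Int)) :
    ireflexive A B relation = true ↔ (∀ i ∈ A, (i, i) ∉ relation) ∧ (∀ i ∈ B, (i, i) ∉ relation) := by
  unfold ireflexive
  rcases hA : ireflexiveLoop relation A with _ | bA
  · rcases hB : ireflexiveLoop relation B with _ | bB
    · rw [ireflexiveLoop_eq_none_iff] at hA hB
      simpa using And.intro hA hB
    · have h2 := ireflexiveLoop_ne_none relation B (by simp [hB])
      rw [hB] at h2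
      injection h2 with h2
      subst h2
      constructor
      · intro hf; simp at hf
      · rintro ⟨_, hBall⟩
        rw [← ireflexiveLoop_eq_none_iff] at hBall
        simp [hBall] at hB
  · have h2 := ireflexiveLoop_ne_none relation A (by simp [hA])
    rw [hA] at h2
    injection h2 with h2
    subst h2
    constructor
    · intro hf; simp at hf
    · rintro ⟨hAall, _⟩
      rw [← ireflexiveLoop_eq_none_iff] at hAall
      simp [hAall] at hA

theorem ireflexiveAltLoop_eq_true_iff (d : PySem.Set Int) (rel : List (Int × Int)) :
    ireflexiveAltLoop d rel = true ↔ ∀ p ∈ rel, ¬(p.1 = p.2 ∧ p.1 ∈ d) := by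
  induction rel with
  | nil => simp [ireflexiveAltLoop]
  | cons p rest ih =>
    rcases p with ⟨x, y⟩
    simp only [ireflexiveAltLoop]
    by_cases h : (x == y && d.contains x) = true
    · rw [if_pos h]
      have h' : x = y ∧ x ∈ d := by simpa [PySem.Set.contains] using h
      constructor
      · intro hf; simp at hf
      · intro hall
        exfalso
        exact hall (x, y) List.mem_cons_self ⟨h'.1, h'.2⟩
    · rw [if_neg h, ih]
      constructor
      · intro hall p hp hpd
        rcases List.mem_cons.mp hp with heq | hmem
        · subst heq
          rcases hpd with ⟨hxy, hd⟩
          simp only at hxy hd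
          subst hxy
          exact h (by simp [PySem.Set.contains, hd])
        · exact hall p hmem hpd
      · intro hall p hp hpd
        exact hall p (List.mem_cons_of_mem _ hp) hpd

theorem mem_domain_iff (A B : List Int) (x : Int) :
    x ∈ PySem.Set.union (PySem.Set.ofList A) B ↔ x ∈ A ∨ x ∈ B := by
  simp [PySem.Set.union]

-- ===== VERDICT (by name: the statement is the Claim_ definition above) =====
theorem ireflexive_spec : Claim_equal_ireflexive := by
  intro A B relation _
  unfold Spec_ireflexive ireflexive_alt
  apply Bool.eq_iff_iff.mpr
  rw [ireflexive_eq_true_iff, ireflexiveAltLoop_eq_true_iff]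
  constructor
  · rintro ⟨hA, hB⟩ ⟨x, y⟩ hp ⟨hxy, hx⟩
    simp only at hxy hx
    subst hxy
    rcases (mem_domain_iff A B x).mp hx with h | h
    · exact hA x h hp
    · exact hB x h hp
  · intro h
    constructor <;> intro i hi hrel
    · exact h (i, i) hrel ⟨rfl, (mem_domain_iff A B i).mpr (Or.inl hi)⟩
    · exact h (i, i) hrel ⟨rfl, (mem_domain_iff A B i).mpr (Or.inr hi)⟩
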